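-- pv_equiv track=rewrite | github.com/Eshmake/EECS_210_Labs | Asheghalishahi_Sina_Lab03/Asheghalishahi_Sina_Lab03/script.py | baseExpansion
-- ===== SOURCE A (Python) =====
-- def baseExpansion(val, base):       #function returns list containing base expansion of given int value
--     q = val             #q is set to copy of call value
--
--     bitList = []
--
--     while(q != 0):          #while q is not 0, a is set equal to remainder of q/base, and q is set to floor div. of q/base
--         a = q%base
--         q //= base
--
--         bitList.append(a)       #each resultant bit value is store in list
--
--     i = 0
--     j = len(bitList)-1
--
--
--     while(j > i):                   #since list contains bit sequence in reverse order, values of each corresponding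
--         temp = bitList[i]           #pair of indices in opp. sides of list are exchanged
--         bitList[i] = bitList[j]
--         bitList[j] = temp
--
--         i +=1
--         j -= 1
--
--
--     return bitList
-- ===== SOURCE B (Python) =====
-- def baseExpansion(val, base):
--     # Recursive digit recurrence, emitting digits most-significant-first directly.
--     if val == 0:
--         return []
--     return baseExpansion(val // base, base) + [val % base]
-- ===== Notes on version B (the rewrite author's own statement) =====
-- stated objective: simpler
-- what changed: Replaced the iterative collect-then-manual-two-pointer-reverse loops with a direct recursion on the digit recurrence that emits digits most-significant-first, eliminating the append list and the swap loop.
import Mathlib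
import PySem

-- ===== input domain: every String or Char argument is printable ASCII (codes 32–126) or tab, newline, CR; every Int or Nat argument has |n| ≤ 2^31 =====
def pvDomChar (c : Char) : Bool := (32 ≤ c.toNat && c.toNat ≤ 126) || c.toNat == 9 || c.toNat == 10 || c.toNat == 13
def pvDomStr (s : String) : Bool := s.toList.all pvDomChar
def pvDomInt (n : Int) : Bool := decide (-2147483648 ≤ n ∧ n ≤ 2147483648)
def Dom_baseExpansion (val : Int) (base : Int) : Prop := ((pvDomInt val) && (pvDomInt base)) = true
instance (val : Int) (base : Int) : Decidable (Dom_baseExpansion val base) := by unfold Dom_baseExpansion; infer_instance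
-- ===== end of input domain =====

-- B replaces A's collect-digits loop plus manual two-pointer reversal by a single
-- recursion on the digit recurrence (simpler decomposition; same cost).

-- ===== PORT A =====
-- first while loop: collect remainders LSB-first; fuel makes the recursion total,
-- 2*|val|+2 steps are ample whenever the Python loop terminates (|base| ≥ 2 halves |q|)
def pvCollect (base : Int) : Nat → Int → List Int → List Int
  | 0, _, acc => acc
  | f + 1, q, acc =>
    if q ≠ 0 then
      pvCollect base f (PySem.Int.floordiv q base) (acc ++ [PySem.Int.mod q base])
    else acc

-- second while loop: the two-pointer in-place swap; indices are always in range on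
-- A's executions, so the total forms pyGetD/pySetD are exact there
def pvSwap (l : List Int) (i j : Int) : List Int :=
  if h : j > i then
    let temp := PySem.List.pyGetD l i 0
    let l1 := PySem.List.pySetD l i (PySem.List.pyGetD l j 0)
    let l2 := PySem.List.pySetD l1 j temp
    pvSwap l2 (i + 1) (j - 1)
  else l
termination_by (j - i).toNat
decreasing_by omega

def baseExpansion (val : Int) (base : Int) : List Int :=
  let bitList := pvCollect base (2 * val.natAbs + 2) val []
  pvSwap bitList 0 ((bitList.length : Int) - 1)

-- ===== PORT B =====
-- Source B's recursion, totalised with the same fuel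
def pvAltRec (base : Int) : Nat → Int → List Int
  | 0, _ => []
  | f + 1, val =>
    if val = 0 then []
    else pvAltRec base f (PySem.Int.floordiv val base) ++ [PySem.Int.mod val base]

def baseExpansion_alt (val : Int) (base : Int) : List Int :=
  pvAltRec base (2 * val.natAbs + 2) val

-- ===== PRECONDITION & SPEC =====
-- Pre_ excludes exactly the inputs where Python A does not return: base = 0 with
-- val ≠ 0 raises ZeroDivisionError, and base ∈ {-1, 1} with val ≠ 0 or base ≥ 2
-- with val < 0 loop forever (q never reaches 0).
def Pre_baseExpansion (val : Int) (base : Int) : Prop :=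
  val = 0 ∨ (0 < val ∧ 2 ≤ base) ∨ base ≤ -2
instance (val : Int) (base : Int) : Decidable (Pre_baseExpansion val base) := by
  unfold Pre_baseExpansion; infer_instance

def pvWitness_baseExpansion : Int × Int := (10, 2)

def Spec_baseExpansion (val : Int) (base : Int) (out : List Int) : Prop := out = baseExpansion_alt val base
instance (val : Int) (base : Int) (out : List Int) : Decidable (Spec_baseExpansion val base out) := by unfold Spec_baseExpansion; infer_instance

-- ===== CLAIM (what is proved, stated in full; the proofs are below) =====
def Claim_equal_baseExpansion : Prop := ∀ (val : Int) (base : Int), Dom_baseExpansion val base → Pre_baseExpansion val base → Spec_baseExpansion val base (baseExpansion val base)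

-- ===== LEMMAS AND PROOFS =====

-- A's first loop builds exactly the reverse of B's recursion, for every fuel
theorem pvCollect_eq_reverse (base : Int) :
    ∀ (f : Nat) (q : Int) (acc : List Int),
      pvCollect base f q acc = acc ++ (pvAltRec base f q).reverse := by
  intro f
  induction f with
  | zero => intro q acc; simp [pvCollect, pvAltRec]
  | succ f ih =>
    intro q acc
    by_cases hq : q = 0
    · simp [pvCollect, pvAltRec, hq]
    · simp [pvCollect, pvAltRec, hq, ih]

theorem set_append_length {α : Type} (a rest : List α) (x v : α) :
    (a ++ x :: rest).set a.length v = a ++ v :: rest := by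
  induction a with
  | nil => simp
  | cons h t ih => simp [ih]

theorem getD_append_length {α : Type} (a rest : List α) (x d : α) :
    (a ++ x :: rest).getD a.length d = x := by
  induction a with
  | nil => simp
  | cons h t ih => simp only [List.cons_append]; exact ih

-- the two-pointer loop over a segment reverses it
theorem pvSwap_seg : ∀ (n : Nat) (m a b : List Int), m.length = n →
    pvSwap (a ++ m ++ b) (a.length : Int) ((a.length : Int) + m.length - 1)
      = a ++ m.reverse ++ b := by
  intro n
  induction n using Nat.strong_induction_on with
  | _ n ih =>
    intro m a b hn
    match m with
    | [] => rw [pvSwap]; simp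
    | [x] => rw [pvSwap]; simp
    | x :: ms' =>
      rcases ms'.eq_nil_or_concat with rfl | ⟨ms, y, rfl⟩
      · rw [pvSwap]; simp
      · -- m = x :: ms ++ [y], length ≥ 2, so the loop body runs once
        simp only [List.concat_eq_append] at hn ⊢
        rw [pvSwap]
        have hjlen : ((a.length : Int) + (x :: (ms ++ [y])).length - 1)
            = (((a ++ x :: ms).length : Nat) : Int) := by
          simp; ring
        have hcond : ((a.length : Int) + (x :: (ms ++ [y])).length - 1) > (a.length : Int) := by
          simp; omega
        rw [dif_pos hcond]
        have hgi : PySem.List.pyGetD (a ++ (x :: (ms ++ [y])) ++ b) (a.length : Int) 0 = x := by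
          rw [show a ++ (x :: (ms ++ [y])) ++ b = a ++ x :: (ms ++ y :: b) by simp,
              PySem.List.pyGetD_natCast]
          exact getD_append_length a _ x 0
        have hgj : PySem.List.pyGetD (a ++ (x :: (ms ++ [y])) ++ b)
            ((a.length : Int) + (x :: (ms ++ [y])).length - 1) 0 = y := by
          rw [show a ++ (x :: (ms ++ [y])) ++ b = (a ++ x :: ms) ++ y :: b by simp, hjlen,
              PySem.List.pyGetD_natCast]
          exact getD_append_length (a ++ x :: ms) _ y 0
        have hs1 : PySem.List.pySetD (a ++ (x :: (ms ++ [y])) ++ b) (a.length : Int) y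
            = a ++ y :: (ms ++ y :: b) := by
          rw [show a ++ (x :: (ms ++ [y])) ++ b = a ++ x :: (ms ++ y :: b) by simp,
              PySem.List.pySetD_natCast]
          exact set_append_length a _ x y
        have hs2 : PySem.List.pySetD (a ++ y :: (ms ++ y :: b))
            ((a.length : Int) + (x :: (ms ++ [y])).length - 1) x
            = (a ++ [y]) ++ ms ++ (x :: b) := by
          rw [show a ++ y :: (ms ++ y :: b) = (a ++ y :: ms) ++ y :: b by simp, hjlen,
              PySem.List.pySetD_natCast,
              show (a ++ x :: ms).length = (a ++ y :: ms).length by simp,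
              set_append_length]
          simp
        simp only [hgi, hgj, hs1, hs2]
        rw [show ((a.length : Int) + 1) = (((a ++ [y]).length : Nat) : Int) by simp,
            show ((a.length : Int) + (x :: (ms ++ [y])).length - 1 - 1)
              = ((((a ++ [y]).length : Nat) : Int) + (ms.length : Int) - 1) by
              simp; ring,
            ih ms.length (by simp at hn; omega) ms (a ++ [y]) (x :: b) rfl]
        simp

theorem pvSwap_reverse (l : List Int) :
    pvSwap l 0 ((l.length : Int) - 1) = l.reverse := by
  have h := pvSwap_seg l.length l [] [] rfl
  simp at h
  exact h

-- ===== VERDICT (by name: the statement is the Claim_ definition above) =====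
theorem baseExpansion_spec : Claim_equal_baseExpansion := by
  intro val base _ _
  unfold Spec_baseExpansion baseExpansion baseExpansion_alt
  rw [pvCollect_eq_reverse]
  have h := pvSwap_reverse (pvAltRec base (2 * val.natAbs + 2) val).reverse
  simp only [List.nil_append, List.length_reverse] at h ⊢
  rw [h, List.reverse_reverse]
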